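-- pv_equiv track=rewrite | github.com/prasshanthshankar-afk/desifaces_backend | services/svc-music/app/app/repos/media_assets_repo.py | _fill_missing_meta
-- ===== SOURCE A (Python) =====
-- from typing import Any, Optional
--
-- def _fill_missing_meta(existing_meta: Any, patch: dict[str, Any]) -> dict[str, Any]:
--     """
--     Like merge, but only fills keys that are missing or blankish in existing_meta.
--     """
--     if not isinstance(existing_meta, dict):
--         return dict(patch)
--
--     merged = dict(existing_meta)
--     for k, v in (patch or {}).items():
--         if k not in merged or merged.get(k) in (None, ""):
--             merged[k] = v
--     return merged
-- ===== SOURCE B (Python) =====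
-- def _fill_missing_meta(existing_meta, patch):
--     """
--     Different strategy: scan existing_meta once while DESTRUCTIVELY consuming a
--     working copy of patch (pop); whatever is left of that copy at the end is
--     exactly the set of genuinely new keys, appended in one update.
--     """
--     if not isinstance(existing_meta, dict):
--         return dict(patch)
--     pending = dict(patch or {})
--     out = {}
--     for k, v in existing_meta.items():
--         if k in pending:
--             pv = pending.pop(k)
--             out[k] = pv if v in (None, "") else v
--         else:
--             out[k] = v
--     out.update(pending)
--     return out
-- ===== Notes on version B (the rewrite author's own statement) =====
-- stated objective: alternative
-- what changed: A copies existing_meta and loops over patch, overwriting missing/blank keys; B loops over existing_meta once while destructively consuming a working copy of patch with pop, so the leftover of that copy is exactly the new keys and is appended in one update - the loop direction and the maintained state are reversed.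
import Mathlib
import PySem

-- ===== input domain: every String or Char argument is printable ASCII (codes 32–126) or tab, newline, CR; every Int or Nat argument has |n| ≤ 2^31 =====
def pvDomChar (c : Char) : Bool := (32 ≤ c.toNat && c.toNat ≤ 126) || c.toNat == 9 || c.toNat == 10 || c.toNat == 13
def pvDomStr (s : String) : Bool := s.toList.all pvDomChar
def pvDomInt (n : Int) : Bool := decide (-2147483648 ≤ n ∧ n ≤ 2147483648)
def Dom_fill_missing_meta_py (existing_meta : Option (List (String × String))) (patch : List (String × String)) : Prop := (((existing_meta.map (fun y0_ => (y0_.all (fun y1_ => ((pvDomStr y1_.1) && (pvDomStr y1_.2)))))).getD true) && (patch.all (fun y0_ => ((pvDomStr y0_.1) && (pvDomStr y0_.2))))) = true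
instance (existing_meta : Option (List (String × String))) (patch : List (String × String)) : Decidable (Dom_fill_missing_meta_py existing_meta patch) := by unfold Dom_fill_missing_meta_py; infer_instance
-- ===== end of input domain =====

-- ===== PORT A =====
-- B reverses the loop: it scans existing_meta once while destructively consuming a
-- working copy of patch, whose leftover is appended; same cost, no speed claim.
-- Port of A: copy existing_meta, then loop over patch inserting where the key is
-- missing or its value is blankish ("" here; values are strings, so None cannot occur).
def fill_missing_meta_py (existing_meta : Option (List (String × String))) (patch : List (String × String)) : List (String × String) :=
  match existing_meta with
  | none => (PySem.Dict.ofList patch).items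
  | some ex =>
      let merged := PySem.Dict.ofList ex
      let final := (PySem.Dict.ofList patch).items.foldl
        (fun m kv => if !(m.contains kv.1) || (m.get? kv.1 == some "") then m.insert kv.1 kv.2 else m)
        merged
      final.items

-- ===== PORT B =====
-- Port of B's loop over existing items: `pending.pop(k)` is PySem.Dict.pop?; out's keys
-- (existing keys, distinct) are fresh in order, so out-as-a-list is this cons-list, and
-- out.update(pending) with disjoint keys appends pending.items.
def pvAltGo (pending : PySem.Dict String String) : List (String × String) → List (String × String)
  | [] => pending.items
  | kv :: t =>
      match pending.pop? kv.1 with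
      | some (pv, rest) => (kv.1, if kv.2 == "" then pv else kv.2) :: pvAltGo rest t
      | none => kv :: pvAltGo pending t

def fill_missing_meta_py_alt (existing_meta : Option (List (String × String))) (patch : List (String × String)) : List (String × String) :=
  match existing_meta with
  | none => (PySem.Dict.ofList patch).items
  | some ex => pvAltGo (PySem.Dict.ofList patch) (PySem.Dict.ofList ex).items

-- ===== PRECONDITION & SPEC =====
def Spec_fill_missing_meta_py (existing_meta : Option (List (String × String))) (patch : List (String × String)) (out : List (String × String)) : Prop := out = fill_missing_meta_py_alt existing_meta patch
instance (existing_meta : Option (List (String × String))) (patch : List (String × String)) (out : List (String × String)) : Decidable (Spec_fill_missing_meta_py existing_meta patch out) := by unfold Spec_fill_missing_meta_py; infer_instance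

-- ===== CLAIM (what is proved, stated in full; the proofs are below) =====
def Claim_equal_fill_missing_meta_py : Prop := ∀ (existing_meta : Option (List (String × String))) (patch : List (String × String)), Dom_fill_missing_meta_py existing_meta patch → Spec_fill_missing_meta_py existing_meta patch (fill_missing_meta_py existing_meta patch)

-- ===== LEMMAS AND PROOFS =====

-- The per-key correction both loops apply, phrased through find? on the patch items.
def pvFix (l : List (String × String)) (kv : String × String) : String × String :=
  match l.find? (fun p => p.1 == kv.1) with
  | some q => if kv.2 == "" then (kv.1, q.2) else kv
  | none => kv

-- Characterisation of A's fill loop: existing items corrected in place, fresh patch keys appended.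
theorem foldA_items (l : List (String × String)) (m : PySem.Dict String String)
    (hm : m.keys.Nodup) (hl : (l.map Prod.fst).Nodup) :
    (l.foldl (fun m kv => if !(m.contains kv.1) || (m.get? kv.1 == some "") then m.insert kv.1 kv.2 else m) m).items
      = m.items.map (pvFix l) ++ l.filter (fun kv => !(m.contains kv.1)) := by
  induction l generalizing m with
  | nil =>
    simp only [List.foldl_nil, List.filter_nil, List.append_nil]
    rw [List.map_congr_left (fun kv _ => by simp [pvFix] : ∀ kv ∈ m.items, pvFix [] kv = id kv), List.map_id]
  | cons a t ih =>
    have hl' : (t.map Prod.fst).Nodup := (List.nodup_cons.mp hl).2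
    have ha : a.1 ∉ t.map Prod.fst := (List.nodup_cons.mp hl).1
    have hfindt : t.find? (fun p => p.1 == a.1) = none := by
      rw [List.find?_eq_none]
      intro x hx hbeq
      have hmem : x.1 ∈ t.map Prod.fst := List.mem_map_of_mem (f := Prod.fst) hx
      rw [eq_of_beq hbeq] at hmem
      exact ha hmem
    simp only [List.foldl_cons]
    by_cases hc : (!(m.contains a.1) || (m.get? a.1 == some "")) = true
    · rw [if_pos hc]
      rw [ih _ (PySem.Dict.nodup_keys_insert m a.1 a.2 hm) hl']
      by_cases hcont : m.contains a.1 = true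
      · -- overwrite in place: a.1 already present with value ""
        have hget : m.get? a.1 = some "" := by
          rcases Bool.or_eq_true_iff.mp hc with h | h
          · simp [hcont] at h
          · simpa using eq_of_beq h
        rw [PySem.Dict.items_insert_of_contains m a.2 hcont]
        rw [List.filter_cons_of_neg (by simp [hcont]), List.map_map]
        have hfilter : t.filter (fun kv => !((m.insert a.1 a.2).contains kv.1))
            = t.filter (fun kv => !(m.contains kv.1)) := by
          apply List.filter_congr
          intro x hx
          have hx1 : x.1 ≠ a.1 := fun h => ha (h ▸ List.mem_map_of_mem hx)
          rw [PySem.Dict.contains_insert]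
          simp [hx1]
        rw [hfilter]
        congr 1
        apply List.map_congr_left
        intro kv hkv
        by_cases hk : kv.1 = a.1
        · -- kv is the unique item with key a.1, so kv = (a.1, "")
          have hmem : (a.1, "") ∈ m.items := (PySem.Dict.get?_eq_some_iff_mem_items m a.1 "" hm).mp hget
          have hkv_eq : kv = (a.1, "") := by
            have := List.inj_on_of_nodup_map (f := Prod.fst) (by simpa [PySem.Dict.keys] using hm)
            exact this hkv hmem (by simp [hk])
          subst hkv_eq
          simp [pvFix, hfindt]
        · simp only [Function.comp, beq_iff_eq, if_neg hk]
          unfold pvFix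
          rw [List.find?_cons_of_neg (by simp; exact fun h => hk h.symm)]
      · -- fresh key: appended at the end
        have hcontf : m.contains a.1 = false := by simpa using hcont
        rw [PySem.Dict.items_insert_of_not_contains m a.2 hcontf]
        rw [List.filter_cons_of_pos (by simp [hcontf]), List.map_append]
        have hfilter : t.filter (fun kv => !((m.insert a.1 a.2).contains kv.1))
            = t.filter (fun kv => !(m.contains kv.1)) := by
          apply List.filter_congr
          intro x hx
          have hx1 : x.1 ≠ a.1 := fun h => ha (h ▸ List.mem_map_of_mem hx)
          rw [PySem.Dict.contains_insert]
          simp [hx1]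
        rw [hfilter]
        have hhead : [(a.1, a.2)].map (pvFix t) = [a] := by
          simp [pvFix, hfindt]
        have hmap : m.items.map (pvFix t) = m.items.map (pvFix (a :: t)) := by
          apply List.map_congr_left
          intro kv hkv
          have hk : kv.1 ≠ a.1 := by
            intro h
            apply absurd hcontf
            have : kv.1 ∈ m.keys := by
              simp only [PySem.Dict.keys]
              exact List.mem_map_of_mem hkv
            simp [(PySem.Dict.contains_iff_mem_keys m a.1).mpr (h ▸ this)]
          unfold pvFix
          rw [List.find?_cons_of_neg (by simp; exact fun h => hk h.symm)]
        rw [hhead, hmap]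
        simp
    · -- key present with a non-blank value: m unchanged, item kept as is
      rw [if_neg hc]
      rw [ih m hm hl']
      have hcont : m.contains a.1 = true := by
        by_contra h
        simp [Bool.not_eq_true] at h
        simp [h] at hc
      have hgetne : ¬ (m.get? a.1 = some "") := by
        intro h
        simp [h] at hc
      rw [List.filter_cons_of_neg (by simp [hcont])]
      congr 1
      apply List.map_congr_left
      intro kv hkv
      by_cases hk : kv.1 = a.1
      · have hget : m.get? a.1 = some kv.2 := by
          rw [PySem.Dict.get?_eq_some_iff_mem_items m a.1 kv.2 hm]
          exact hk ▸ hkv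
        have hne : ¬ (kv.2 = "") := fun h => hgetne (h ▸ hget)
        unfold pvFix
        rw [List.find?_cons_of_pos (by simp [hk])]
        cases hft : t.find? (fun p => p.1 == kv.1) <;> simp [hne]
      · unfold pvFix
        rw [List.find?_cons_of_neg (by simp; exact fun h => hk h.symm)]

-- Erasing a different key does not change what find? sees.
theorem find?_filter_ne (l : List (String × String)) (k a : String) (h : k ≠ a) :
    (l.filter (fun q => !(q.1 == a))).find? (fun q => q.1 == k) = l.find? (fun q => q.1 == k) := by
  induction l with
  | nil => rfl
  | cons x t ih =>
    by_cases hx : x.1 = a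
    · rw [List.filter_cons_of_neg (by simp [hx])]
      rw [List.find?_cons_of_neg (by simp [hx]; exact fun hk => h hk.symm)]
      exact ih
    · rw [List.filter_cons_of_pos (by simp [hx])]
      by_cases hk : x.1 = k
      · rw [List.find?_cons_of_pos (by simp [hk]), List.find?_cons_of_pos (by simp [hk])]
      · rw [List.find?_cons_of_neg (by simp [hk]), List.find?_cons_of_neg (by simp [hk])]
        exact ih

-- Characterisation of B's consuming scan: existing items corrected, then the leftover
-- of pending = the pending items whose key occurs in no existing item.
theorem pvAltGo_eq (l : List (String × String)) (p : PySem.Dict String String)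
    (hl : (l.map Prod.fst).Nodup) :
    pvAltGo p l = l.map (pvFix p.items) ++ p.items.filter (fun kv => !(l.map Prod.fst).contains kv.1) := by
  induction l generalizing p with
  | nil =>
    simp [pvAltGo]
  | cons a t ih =>
    have hl' : (t.map Prod.fst).Nodup := (List.nodup_cons.mp hl).2
    have ha : a.1 ∉ t.map Prod.fst := (List.nodup_cons.mp hl).1
    cases hp : p.pop? a.1 with
    | some pr =>
      obtain ⟨pv, rest⟩ := pr
      have hget : p.get? a.1 = some pv ∧ rest = p.erase a.1 := by
        simp only [PySem.Dict.pop?] at hp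
        cases hg : p.get? a.1 with
        | none => rw [hg] at hp; simp at hp
        | some v => rw [hg] at hp; simp at hp; exact ⟨by rw [hp.1], hp.2.symm⟩
      obtain ⟨hget, hrest⟩ := hget
      -- head equals pvFix p.items a
      have hhead : (a.1, if a.2 == "" then pv else a.2) = pvFix p.items a := by
        simp only [PySem.Dict.get?] at hget
        cases hf : p.items.find? (fun q => q.1 == a.1) with
        | none => rw [hf] at hget; simp at hget
        | some q =>
          rw [hf] at hget; simp at hget
          unfold pvFix
          rw [hf]
          by_cases hb : a.2 = ""
          · simp [hb, hget]
          · simp [hb]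
      simp only [pvAltGo, hp]
      rw [ih rest hl', hrest]
      have hitems : (p.erase a.1).items = p.items.filter (fun q => !(q.1 == a.1)) := rfl
      have hmap : (t.map (pvFix (p.erase a.1).items)) = t.map (pvFix p.items) := by
        apply List.map_congr_left
        intro kv hkv
        have hk : kv.1 ≠ a.1 := fun h => ha (h ▸ List.mem_map_of_mem hkv)
        unfold pvFix
        rw [hitems, find?_filter_ne _ _ _ hk]
      have hfil : (p.erase a.1).items.filter (fun kv => !(t.map Prod.fst).contains kv.1)
          = p.items.filter (fun kv => !((a :: t).map Prod.fst).contains kv.1) := by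
        rw [hitems, List.filter_filter]
        apply List.filter_congr
        intro x _
        simp
        exact Bool.and_comm _ _
      rw [hmap, hfil, hhead]
      simp [pvFix]
    | none =>
      have hget : p.get? a.1 = none := by
        simp only [PySem.Dict.pop?] at hp
        cases hg : p.get? a.1 with
        | none => rfl
        | some v => rw [hg] at hp; simp at hp
      have hhead : a = pvFix p.items a := by
        simp only [PySem.Dict.get?] at hget
        cases hf : p.items.find? (fun q => q.1 == a.1) with
        | none => unfold pvFix; rw [hf]
        | some q => rw [hf] at hget; simp at hget
      have hnomem : ∀ q ∈ p.items, q.1 ≠ a.1 := by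
        intro q hq h
        have : p.items.find? (fun r => r.1 == a.1) = none := by
          simp only [PySem.Dict.get?] at hget
          cases hf : p.items.find? (fun r => r.1 == a.1) with
          | none => rfl
          | some r => rw [hf] at hget; simp at hget
        have := List.find?_eq_none.mp this q hq
        simp [h] at this
      have hfil : p.items.filter (fun kv => !(t.map Prod.fst).contains kv.1)
          = p.items.filter (fun kv => !((a :: t).map Prod.fst).contains kv.1) := by
        apply List.filter_congr
        intro x hx
        have := hnomem x hx
        simp
        tauto
      simp only [pvAltGo, hp]
      rw [ih p hl', hfil]
      simp only [List.map_cons]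
      rw [← hhead]
      simp

-- ===== VERDICT (by name: the statement is the Claim_ definition above) =====
theorem fill_missing_meta_py_spec : Claim_equal_fill_missing_meta_py := by
  intro existing_meta patch _
  unfold Spec_fill_missing_meta_py fill_missing_meta_py fill_missing_meta_py_alt
  cases existing_meta with
  | none => rfl
  | some ex =>
    simp only
    rw [foldA_items _ _ (PySem.Dict.nodup_keys_ofList ex)
        (by simpa [PySem.Dict.keys] using PySem.Dict.nodup_keys_ofList patch)]
    rw [pvAltGo_eq _ _ (by simpa [PySem.Dict.keys] using PySem.Dict.nodup_keys_ofList ex)]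
    congr 1
    apply List.filter_congr
    intro kv _
    have : (PySem.Dict.ofList ex).contains kv.1
        = ((PySem.Dict.ofList ex).items.map Prod.fst).contains kv.1 := by
      rw [PySem.Dict.contains_eq_decide_mem_keys]
      simp [PySem.Dict.keys]
    rw [this]
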